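/-
  A MIXED WALK: integer, SSE and check-call steps composed — the first 40 instructions of the loop body of
  `imdct_step3_iter0_loop` (104FE0H in the staged image; the body starts at 10500AH, offset 42), stepped one after the other by
  `u_step_code` from the function's own bytes (`#code_bytes`, c/gen_code.py on c/vorbis_f.elf), inside a `ReachVia` whose
  invariant is "not at `__asan_report`".

  The stretch has 11 integer instructions (mov, lea, 32-bit loads of float bits into general registers), 6 calls of
  `__asan_load4_noabort` and 23 SSE instructions (movss loads and stores, movd both ways, subss / addss / mulss with register
  and memory sources, movaps). It is what the farm's workers will see most of.

  WHAT IS ASSUMED HERE AND NOT PROVED (the walker's and the runtime proofs' business, not the stepper's):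
    * the check routine's CONTRACT `hcheck`: entered with `Live rdi 4`, it returns to the address on the stack with RSP popped,
      RAX RCX RDX and RFLAGS arbitrary, everything else (memory, the other registers, XMM, MXCSR) as it was — its success path
      (100640H: cmp / ja / lea rax / mov rcx / shr / … / ret) clobbers exactly these;
    * `Live L a k`: the range lies in the user region and does not meet the function's code — what "the address is inside a
      live object" gives a proof (Asan/Shadow.lean: the live set is disjoint from the code); it yields the `L.Has` of every
      access, and keeps the code in memory across every store (`CodeAt.writeLE_has`).

  WHAT THE TEST SHOWS: see the report at the end of the file (state term, context, milliseconds per instruction).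
-/
import UserX.SseStep
import UserX.ReachVia
open X86 X86.Sem X86.User

set_option linter.unusedSimpArgs false
set_option linter.unusedVariables false
set_option maxRecDepth 4000

namespace X86.User.SseSeqTest

-- imdct_step3_iter0_loop: 934 bytes, at 0x104fe0
#code_bytes code_imdct_step3_iter0_loop
  "415741564155415455534883ec184c89c54863d24c8d24964863c9498d1c8cc1"
  "ff024189fee9640300004c89e7e82eb6ffff458b3c244889dfe822b6fffff30f"
  "103366410f6ed7f30f11742408f30f5cd6f30f11542404498d7c24fce8ffb5ff"
  "ff458b6c24fc488d7bfce8f1b5ffff66410f6ee5f30f5c63fcf30f1164240c66"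
  "410f6ec7f30f58442408f3410f11042466410f6ec5f30f5843fcf3410f114424"
  "fc4889efe8b7b5fffff30f105c2404f30f595d0066410f7edd488d7d04e89eb5"
  "fffff30f1064240c0f28c4f30f59450466410f6ed5f30f5cd0f30f1113f30f59"
  "65000f28c4f30f104c2404f30f594d04f30f58c1f30f1143fc498d7c24f8e85d"
  "b5ffff458b6c24f8488d7bf8e84fb5fffff30f1063f866410f6eedf30f116424"
  "08f30f5cecf30f116c2404498d7c24f4e82bb5ffff458b7c24f4488d7bf4e81d"
  "b5ffff66410f6efff30f5c7bf4f30f117c240c66410f6ec5f30f58442408f341"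
  "0f114424f866410f6ec7f30f5843f4f3410f114424f4488d7d20e8e1b4fffff3"
  "0f10742404f30f59752066410f7ef7488d7d24e8c8b4fffff30f107c240c0f28"
  "c7f30f59452466410f6ed7f30f5cd0f30f1153f8f30f597d200f28c7f30f104c"
  "2404f30f594d24f30f58c1f30f1143f4498d7c24f0e886b4ffff458b6c24f048"
  "8d7bf0e878b4fffff30f107bf066410f6ed5f30f117c2408f30f5cd7f30f1154"
  "2404498d7c24ece854b4ffff458b7c24ec488d7bece846b4ffff66410f6eeff3"
  "0f5c6becf30f116c240c66410f6ec5f30f58442408f3410f114424f066410f6e"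
  "c7f30f5843ecf3410f114424ec488d7d40e80ab4fffff30f105c2404f30f595d"
  "4066410f7edf488d7d44e8f1b3fffff30f106c240c0f28c5f30f59454466410f"
  "6ef7f30f5cf0f30f1173f0f30f596d400f28c5f30f104c2404f30f594d44f30f"
  "58c1f30f1143ec498d7c24e8e8afb3ffff458b6c24e8488d7be8e8a1b3fffff3"
  "0f106be866410f6ef5f30f116c2408f30f5cf5f30f11742404498d7c24e4e87d"
  "b3ffff458b7c24e4488d7be4e86fb3ffff66410f6edff30f5c5be4f30f115c24"
  "0c66410f6ec5f30f58442408f3410f114424e866410f6ec7f30f5843e4f3410f"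
  "114424e4488d7d60e833b3fffff30f10542404f30f59556066410f7ed7488d7d"
  "64e81ab3fffff30f105c240c0f28c3f30f59456466410f6ee7f30f5ce0f30f11"
  "63e8f30f595d600f28c3f30f104c2404f30f594d64f30f58c1f30f1143e44883"
  "ed804983ec204883eb204183ee014585f60f8f93fcffff4883c4185b5d415c41"
  "5d415e415fc3"

-- every instruction of the function has its decode fact (made here, at command level: `u_step_code` inside a `theorem` must
-- find the fact in the environment — making one on the fly there writes an environment extension from an asynchronous
-- elaboration task, which Lean refuses; a farm proof imports the image's facts)
#code_sweep code_imdct_step3_iter0_loop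

/-- The address the function has in the staged image (a literal: RIP and the targets of calls are then literals), its size. -/
local notation "fnBase" => (0x104fe0 : Word)
local notation "fnSize" => (934 : Nat)

/-- **A live range**: inside the user region, and not meeting the function's code. -/
structure Live (L : Layout) (a : Word) (k : Nat) : Prop where
  has : L.Has a k
  outside : a.toNat + k ≤ (fnBase).toNat ∨ (fnBase).toNat + fnSize ≤ a.toNat

variable {L : Layout} {μ : Microarch}

/-- A store to a live range keeps the function's code in memory. -/
theorem codeAt_store {mem : Mem} {a : Word} {k : Nat} (x : Nat) (hl : Live L a k)
    (hb : L.Has fnBase code_imdct_step3_iter0_loop.length) (h : CodeAt mem fnBase code_imdct_step3_iter0_loop) :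
    CodeAt (mem.writeLE a k x) fnBase code_imdct_step3_iter0_loop :=
  CodeAt.writeLE_has h x hb hl.has hl.outside

/-- The frame of one step of the walk: the code hypothesis and RIP of the CURRENT state `S` (which the goal determines), then
the step. -/
theorem step_with_code {S : State} {Q : State → Prop} (off : Nat)
    (hc : HasCode L S fnBase code_imdct_step3_iter0_loop) (hr : S.rip = fnBase + UInt64.ofNat off)
    (k : HasCode L S fnBase code_imdct_step3_iter0_loop → S.rip = fnBase + UInt64.ofNat off → Step L μ S Q) :
    Step L μ S Q :=
  k hc hr

/-- The invariant of the way: not at `__asan_report` (100059H in the staged image). -/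
def I (v : State) : Prop := v.rip ≠ 0x100059

/-- `w_code h`: the goal `HasCode L S fnBase code`, `S` the base state of `h` under a nest of setters whose stores all go to
`Live` ranges of the context. -/
macro "w_code " h:ident : tactic => `(tactic| (
  refine ⟨?_, ($h).2⟩
  try simp (implicitDefEqProofs := false) only [X86.User.State.mem_setReg, X86.User.State.mem_setRip,
    X86.User.State.mem_setFlags, X86.User.State.mem_setMem, X86.User.State.mem_setMxcsr, X86.User.State.mem_writeVecLow]
  repeat (refine codeAt_store _ (by assumption) ($h).2 ?_)
  exact ($h).1))

/-- The rewrite facts of the walk (hypotheses about the base state). -/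
syntax "w_facts" : term

/-- `w_step off`: one instruction of the function, at offset `off`, from the current state of a `ReachVia` goal. -/
syntax "w_step " num : tactic

/-- `w_check`: the current state is at the entry of `__asan_load4_noabort`: its contract, then the state it returns in. -/
syntax "w_check" : tactic

/-- A store read back at the same address and size, whatever was stored (the return address a `call` pushed is a literal). -/
theorem readLE8_writeLE8_any (f : Mem) (a : Word) (n : Nat) : (f.writeLE a 8 n).readLE a 8 = n % 256 ^ 8 :=
  Mem.readLE_writeLE_same f a 8 n (by decide)

section
variable {u : State} {P : State → Prop}
variable (r12 rbx rbp rsp : Word) (fl : Flags)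

set_option hygiene false in
macro_rules
  | `(term| w_facts) => `(term| True)

set_option hygiene false in
macro_rules
  | `(tactic| w_step $off) => `(tactic| (
      refine ReachVia.step ?_ ?_
      -- the invariant of the way: RIP of the current state is a literal, and it is not `__asan_report`
      · unfold I
        try simp (implicitDefEqProofs := false) only [X86.User.State.rip_setRip, hrip]
        decide
      refine step_with_code $off ?_ ?_ ?_
      · w_code hcode
      · first
        | exact hrip
        | rfl
      intro w_c w_r
      u_step_code w_c $off w_r [h_r12, h_rbx, h_rbp, h_rsp, hrip, h_fl, hμ.vendor]
      all_goals (try clear w_c w_r)))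

set_option hygiene false in
macro_rules
  | `(tactic| w_check) => `(tactic| (
      refine hcheck _ _ ?_ ?_ ?_
      -- at the routine's entry
      · simp (implicitDefEqProofs := false) only [X86.User.State.rip_setRip]
      -- the address in RDI is live
      · simp (implicitDefEqProofs := false) only [u_step, u_norm, h_r12, h_rbx, h_rbp, h_rsp]
        assumption
      -- the state it returns in: normalised like the state a step leaves
      intro rax1 rcx1 rdx1 fl1
      simp (implicitDefEqProofs := false) only [u_step, u_norm, word_lit, readLE8_writeLE8_any,
        h_r12, h_rbx, h_rbp, h_rsp, hrip, h_fl]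
      -- the values the call before this one left in RAX RCX RDX RFLAGS are gone
      u_clear_stale [rax1, rcx1, rdx1, fl1]))

/-- **Forty instructions of the loop body** (10500AH – 1050CBH), from a state whose pointer registers are named: `r12` and `rbx`
walk down the two halves of the buffer, `rbp` is the twiddle table, `rsp` the frame. -/
theorem walk_loop_body
    (hcode : HasCode L u fnBase code_imdct_step3_iter0_loop) (hrip : u.rip = fnBase + UInt64.ofNat 42)
    (h_r12 : u.reg .r12 = r12) (h_rbx : u.reg .rbx = rbx) (h_rbp : u.reg .rbp = rbp) (h_rsp : u.reg .rsp = rsp)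
    (h_fl : u.flags = fl) (hμ : UserX.MicroOK μ) (hs : SseOK u)
    -- what the loop invariant gives: the buffer elements and the twiddle factors of this round are live
    (hl_e0 : Live L r12 4) (hl_e0m1 : Live L (r12 - 4) 4) (hl_e2 : Live L rbx 4) (hl_e2m1 : Live L (rbx - 4) 4)
    (hl_a0 : Live L rbp 4) (hl_a1 : Live L (rbp + 4) 4)
    -- the frame: three spill slots, and the slot of a callee's return address
    (hl_s4 : Live L (rsp + 4) 4) (hl_s8 : Live L (rsp + 8) 4) (hl_s12 : Live L (rsp + 12) 4) (hl_ret : Live L (rsp - 8) 8)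
    -- the contract of `__asan_load4_noabort` (100640H)
    (hcheck : ∀ (v : State) (P : State → Prop), v.rip = 0x100640 → Live L (v.reg .rdi) 4 →
      (∀ (rax rcx rdx : Word) (fl : Flags),
        ReachVia L μ I
          ((((((v.setReg .rax rax).setReg .rcx rcx).setReg .rdx rdx).setReg .rsp (v.reg .rsp + 8)).setFlags fl).setRip
            (UInt64.ofNat (v.mem.readLE (v.reg .rsp) 8))) P) →
      ReachVia L μ I v P)
    (hP : ∀ v : State, v.rip = 0x1050cb → SseOK v → P v) :
    ReachVia L μ I u P := by
  -- the range facts of the accesses, where the stepper looks for them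
  have hh_e0 := hl_e0.has
  have hh_e0m1 := hl_e0m1.has
  have hh_e2 := hl_e2.has
  have hh_e2m1 := hl_e2m1.has
  have hh_a0 := hl_a0.has
  have hh_a1 := hl_a1.has
  have hh_s4 := hl_s4.has
  have hh_s8 := hl_s8.has
  have hh_s12 := hl_s12.has
  have hh_ret := hl_ret.has
  w_step 42      -- 10500a  mov rdi,r12
  w_step 45      -- 10500d  call 100640
  w_check
  w_step 50      -- 105012  mov r15d,DWORD PTR [r12]
  w_step 54      -- 105016  mov rdi,rbx
  w_step 57      -- 105019  call 100640
  w_check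
  w_step 62      -- 10501e  movss xmm6,DWORD PTR [rbx]
  w_step 66      -- 105022  movd xmm2,r15d
  w_step 71      -- 105027  movss DWORD PTR [rsp+0x8],xmm6
  w_step 77      -- 10502d  subss xmm2,xmm6
  w_step 81      -- 105031  movss DWORD PTR [rsp+0x4],xmm2
  w_step 87      -- 105037  lea rdi,[r12-0x4]
  w_step 92      -- 10503c  call 100640
  w_check
  w_step 97      -- 105041  mov r13d,DWORD PTR [r12-0x4]
  w_step 102      -- 105046  lea rdi,[rbx-0x4]
  w_step 106      -- 10504a  call 100640
  w_check
  w_step 111      -- 10504f  movd xmm4,r13d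
  w_step 116      -- 105054  subss xmm4,DWORD PTR [rbx-0x4]
  w_step 121      -- 105059  movss DWORD PTR [rsp+0xc],xmm4
  w_step 127      -- 10505f  movd xmm0,r15d
  w_step 132      -- 105064  addss xmm0,DWORD PTR [rsp+0x8]
  w_step 138      -- 10506a  movss DWORD PTR [r12],xmm0
  w_step 144      -- 105070  movd xmm0,r13d
  w_step 149      -- 105075  addss xmm0,DWORD PTR [rbx-0x4]
  w_step 154      -- 10507a  movss DWORD PTR [r12-0x4],xmm0
  w_step 161      -- 105081  mov rdi,rbp
  w_step 164      -- 105084  call 100640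
  w_check
  w_step 169      -- 105089  movss xmm3,DWORD PTR [rsp+0x4]
  w_step 175      -- 10508f  mulss xmm3,DWORD PTR [rbp+0x0]
  w_step 180      -- 105094  movd r13d,xmm3
  w_step 185      -- 105099  lea rdi,[rbp+0x4]
  w_step 189      -- 10509d  call 100640
  w_check
  w_step 194      -- 1050a2  movss xmm4,DWORD PTR [rsp+0xc]
  w_step 200      -- 1050a8  movaps xmm0,xmm4
  w_step 203      -- 1050ab  mulss xmm0,DWORD PTR [rbp+0x4]
  w_step 208      -- 1050b0  movd xmm2,r13d
  w_step 213      -- 1050b5  subss xmm2,xmm0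
  w_step 217      -- 1050b9  movss DWORD PTR [rbx],xmm2
  w_step 221      -- 1050bd  mulss xmm4,DWORD PTR [rbp+0x0]
  w_step 226      -- 1050c2  movaps xmm0,xmm4
  w_step 229      -- 1050c5  movss xmm1,DWORD PTR [rsp+0x4]
  -- the end of the stretch
  refine ReachVia.done (hP _ ?_ ?_)
  · simp (implicitDefEqProofs := false) only [X86.User.State.rip_setRip]
  · u_sseok

end

/-! ### REPORT (measured on cpus 160-175 of the loaded host, 2026-09-20; `u_timed` around every `w_step` / `w_check`)

THE WALK: 40 instructions + 6 uses of the check contract, 6.0 s of tactic time in all = 150 ms per instruction, of which the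
STEPPER (`u_step_code`: look-up of the decode fact, `Step.of_codeNat`, the body) takes

      SSE step            14 – 30 ms at the start of the walk, 35 – 67 ms at its end (the normalising `simp` sees the whole state)
      integer step        30 – 100 ms (mov / lea / a 32-bit load)
      call rel32          205 – 260 ms (M2's figure: 220 ms; seven observations of the machine)
      check contract      20 – 49 ms (`w_check`: three `simp` calls on the state)

and the rest is this file's own bookkeeping, which is NOT the stepper's: 15 ms for `ReachVia.step` and the invariant
`rip ≠ 100059H`, and `w_code` — re-proving `HasCode` of the current state through every store layer — 14 ms at the start,
75 – 85 ms at the end (9 layers). A walker that carries the code as `Mem.EqOn` on a span (M3) does not pay that per layer.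

THE STATE after the 40 instructions (a nest over the base state `u`; nothing else is needed to go on):

      7 general registers    rax rcx rdx (the last check call's arbitrary values) rsp rdi r13 r15
      6 vector registers     xmm0 xmm1 xmm2 xmm3 xmm4 xmm6 — each ONE opaque `x1 : Vec`, whatever was computed into it
      MXCSR                  ONE opaque `mx1` with `hmx1 : mx1 &&& 1F80H = 1F80H`      (8 floating-point arithmetic instructions ran)
      memory                 9 `writeLE` layers over `u.mem`: 6 float stores (each an opaque `x1 : BitVec 32`) and 3 of the 6
                             return-address pushes — a push directly after another one overwrites it (UserX/MemNorm.lean);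
                             two stores to the same slot that are separated by a store elsewhere both stay (12 layers without
                             the rule)
      RFLAGS                 the last check call's arbitrary `fl1`;  RIP a literal
      r15                    `Word.ofBV (BitVec.ofNat 32 ((u.mem.writeLE (rsp - 8) 8 1069074).readLE r12 4))`: a load THROUGH a
                             store at another address stays as it is (disjointness is the walker's business: M2, "not done")

THE CONTEXT after the 40 instructions: the hypotheses of the theorem, and 13 opaque values (`x1`: 6 vectors, 7 stored /
converted 32-bit values), `mx1`, `hmx1`, `rax1 rcx1 rdx1 fl1`: 19 in all, and every one of them occurs in the state. The steps
introduced 66 (SSE: 19 vectors, 7 32-bit values, 8 MXCSR values with 8 mask facts; the six check calls: 24): `u_sse_tidy` (end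
of every step) cleared the 13 vectors and the 7 MXCSR values and mask facts that had been overwritten, `u_clear_stale` in
`w_check` the 20 values of the five earlier check calls.

WHAT COMPOSES: an SSE step needs `SseOK` of the current state — after integer steps, after a check call, after other SSE steps:
closed every time by `u_sseok` from `hs : SseOK u` or the latest `hmx1`, no goal was ever left. The integer loads that follow
an SSE store, the `movd xmm, r32` that follows an integer load, the check calls between them: the facts about the BASE state
(`h_r12` …) serve every step, because the state is a nest over `u`.
-/

end X86.User.SseSeqTest
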